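-- pv_equiv track=rewrite | github.com/GTerglav/programiranje-1 | izpiti/2018-07-06/resevanj5.py | razdeli
-- ===== SOURCE A (Python) =====
-- def simetricen(niz):
--     if niz == "":
--         return True
--     elif niz[0] == niz[-1]:
--         return simetricen(niz[1:-1])
--
-- def razdeli(niz):
--     sez = []
--     if niz == "":
--         return sez
--     lower = 0
--     for i in range(len(niz)):
--         if i == len(niz):
--             sez.append(niz[lower:])
--         if simetricen(niz[lower:i]) and not simetricen(niz[lower:i + 1]):
--             sez.append(niz[lower:i])
--             lower = i + 1
--     return sez
-- ===== SOURCE B (Python) =====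
-- def razdeli(niz):
--     # Recursive greedy decomposition: from position `lower`, scan for the first
--     # cut point i where niz[lower:i] is a palindrome (checked by reversal) but
--     # adding niz[i] breaks it; emit that piece, skip niz[i], and recurse.
--     n = len(niz)
--
--     def chunks(lower, i):
--         while i < n:
--             seg = niz[lower:i]
--             ext = seg + niz[i]
--             if seg == seg[::-1] and ext != ext[::-1]:
--                 return [seg] + chunks(i + 1, i + 1)
--             i += 1
--         return []
--
--     return chunks(0, 0)
-- ===== Notes on version B (the rewrite author's own statement) =====
-- stated objective: faster
-- what changed: Replaces the recursive slice-peeling palindrome test (O(len^2) per call) with a reversal comparison, and replaces the single accumulator for-loop carrying (sez, lower) with a recursive decomposition that emits each chunk and recurses past the breaking character.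
import Mathlib
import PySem

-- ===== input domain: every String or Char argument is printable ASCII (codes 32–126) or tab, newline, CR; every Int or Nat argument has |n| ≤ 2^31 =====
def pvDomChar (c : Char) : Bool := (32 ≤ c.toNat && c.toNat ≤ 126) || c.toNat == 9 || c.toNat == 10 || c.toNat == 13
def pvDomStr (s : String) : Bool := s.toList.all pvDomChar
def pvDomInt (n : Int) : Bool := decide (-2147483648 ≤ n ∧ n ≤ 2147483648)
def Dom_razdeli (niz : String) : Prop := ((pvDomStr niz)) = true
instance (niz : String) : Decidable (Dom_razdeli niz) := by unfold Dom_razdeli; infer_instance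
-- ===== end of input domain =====

-- B replaces A's recursive slice-peeling palindrome test with a reversal comparison and
-- A's single accumulator for-loop with a recursive chunk decomposition.

-- ===== PORT A =====

-- simetricen: True for "", recurses on niz[1:-1] if the ends match; otherwise Python
-- falls off the function and returns None (falsy) — ported as its truthiness: None ↦ false.
def simetricenA (cs : List Char) : Bool :=
  if h : cs = [] then true
  else if cs.head h = cs.getLast h then
    simetricenA (PySem.List.slice cs (some 1) (some (-1)))
  else false
termination_by cs.length
decreasing_by
  have hp : 0 < cs.length := List.length_pos_iff.mpr h
  simp [PySem.List.length_slice, PySem.List.clampIdx, h]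
  omega

def razdeli (niz : String) : List String :=
  let cs := niz.toList
  if niz = "" then []
  else
    ((PySem.List.pyRange 0 (cs.length : Int) 1).foldl
      (fun (st : List String × Int) i =>
        let sez := st.1
        let lower := st.2
        -- dead branch kept from A: `if i == len(niz): sez.append(niz[lower:])`
        let sez := if i = (cs.length : Int) then
            sez ++ [String.ofList (PySem.List.slice cs (some lower) none)]
          else sez
        if simetricenA (PySem.List.slice cs (some lower) (some i)) &&
           !simetricenA (PySem.List.slice cs (some lower) (some (i + 1))) then
          (sez ++ [String.ofList (PySem.List.slice cs (some lower) (some i))], i + 1)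
        else (sez, lower))
      ([], 0)).1

-- ===== PORT B =====

-- chunks(lower, i): Source B's while-loop plus early return as one recursion;
-- niz[lower:i] with 0 ≤ lower ≤ i is drop/take (exact by PySem.List.slice_natCast),
-- seg[::-1] is seg.reverse (exact by PySem.List.slice?_none_none_neg_one).
def chunksB (cs : List Char) (lower i : Nat) : List String :=
  if h : i < cs.length then
    let seg := (cs.drop lower).take (i - lower)
    let ext := seg ++ [cs[i]]
    if seg == seg.reverse && !(ext == ext.reverse) then
      String.ofList seg :: chunksB cs (i + 1) (i + 1)
    else
      chunksB cs lower (i + 1)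
  else []
termination_by cs.length - i

def razdeli_alt (niz : String) : List String :=
  chunksB niz.toList 0 0

-- ===== PRECONDITION & SPEC =====
def Spec_razdeli (niz : String) (out : List String) : Prop := out = razdeli_alt niz
instance (niz : String) (out : List String) : Decidable (Spec_razdeli niz out) := by unfold Spec_razdeli; infer_instance

-- ===== CLAIM (what is proved, stated in full; the proofs are below) =====
def Claim_equal_razdeli : Prop := ∀ (niz : String), Dom_razdeli niz → Spec_razdeli niz (razdeli niz)

-- ===== LEMMAS AND PROOFS =====

-- niz[1:-1] is tail-then-dropLast
lemma slice_one_neg_one (cs : List Char) :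
    PySem.List.slice cs (some 1) (some (-1)) = cs.tail.dropLast := by
  simp [PySem.List.slice, PySem.List.clampIdx]
  rcases cs with _ | ⟨a, t⟩
  · simp
  · simp [List.dropLast_eq_take]

-- A's palindrome test agrees with B's reversal comparison
lemma simA_eq_rev (cs : List Char) : simetricenA cs = (cs == cs.reverse) := by
  suffices h : ∀ n (cs : List Char), cs.length = n → simetricenA cs = (cs == cs.reverse) from
    h cs.length cs rfl
  intro n
  induction n using Nat.strong_induction_on with
  | _ n ih =>
    intro cs hn
    rcases cs with _ | ⟨a, t⟩
    · simp [simetricenA]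
    · rcases List.eq_nil_or_concat t with rfl | ⟨mid, b, rfl⟩
      · rw [simetricenA]
        simp [slice_one_neg_one, simetricenA]
      · simp only [List.concat_eq_append] at hn ⊢
        rw [simetricenA]
        have hlast : (a :: (mid ++ [b])).getLast (by simp) = b := by simp
        rw [dif_neg (by simp)]
        simp only [slice_one_neg_one, List.tail_cons, List.dropLast_append_cons,
          List.dropLast_singleton, List.append_nil, List.head_cons, hlast]
        rw [ih mid.length (by simp at hn; omega) mid rfl, Bool.eq_iff_iff]
        by_cases hab : a = b
        · subst hab
          simp [List.reverse_append]
        · simp [hab]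

-- extending the slice niz[lower:k] by one position appends the character niz[k]
lemma take_drop_succ (cs : List Char) (lower k : Nat) (hlk : lower ≤ k) (hk : k < cs.length) :
    (cs.drop lower).take (k + 1 - lower) = (cs.drop lower).take (k - lower) ++ [cs[k]] := by
  have h2 : k + 1 - lower = (k - lower) + 1 := by omega
  rw [h2, List.take_add_one]
  congr 1
  rw [List.getElem?_drop]
  have : lower + (k - lower) = k := by omega
  rw [this]
  simp [List.getElem?_eq_getElem hk]

-- A's fold over range(k, len) with current cut position `lower` produces B's chunks(lower, k)
lemma loop_eq (cs : List Char) (k lower : Nat) (hlk : lower ≤ k) (acc : List String) :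
    ((PySem.List.pyRange (k : Int) (cs.length : Int) 1).foldl
      (fun (st : List String × Int) i =>
        let sez := st.1
        let lower := st.2
        let sez := if i = (cs.length : Int) then
            sez ++ [String.ofList (PySem.List.slice cs (some lower) none)]
          else sez
        if simetricenA (PySem.List.slice cs (some lower) (some i)) &&
           !simetricenA (PySem.List.slice cs (some lower) (some (i + 1))) then
          (sez ++ [String.ofList (PySem.List.slice cs (some lower) (some i))], i + 1)
        else (sez, lower))
      (acc, (lower : Int))).1 = acc ++ chunksB cs lower k := by
  set f := (fun (st : List String × Int) i =>
        let sez := st.1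
        let lower := st.2
        let sez := if i = (cs.length : Int) then
            sez ++ [String.ofList (PySem.List.slice cs (some lower) none)]
          else sez
        if simetricenA (PySem.List.slice cs (some lower) (some i)) &&
           !simetricenA (PySem.List.slice cs (some lower) (some (i + 1))) then
          (sez ++ [String.ofList (PySem.List.slice cs (some lower) (some i))], i + 1)
        else (sez, lower)) with hf
  suffices h : ∀ m k lower acc, cs.length - k = m → lower ≤ k →
      ((PySem.List.pyRange (k : Int) (cs.length : Int) 1).foldl f
        (acc, (lower : Int))).1 = acc ++ chunksB cs lower k from
    h (cs.length - k) k lower acc rfl hlk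
  intro m
  induction m using Nat.strong_induction_on with
  | _ m ih =>
    intro k lower acc hm hlk
    by_cases hk : k < cs.length
    · rw [PySem.List.pyRange_one_cons (by omega), List.foldl_cons]
      have hne : ¬ ((k : Int) = (cs.length : Int)) := by omega
      have hcast : ((k : Int) + 1) = ((k + 1 : Nat) : Int) := by push_cast; ring
      have hstep : f (acc, (lower : Int)) (k : Int) =
          if ((cs.drop lower).take (k - lower) == ((cs.drop lower).take (k - lower)).reverse &&
              !((cs.drop lower).take (k - lower) ++ [cs[k]] ==
                ((cs.drop lower).take (k - lower) ++ [cs[k]]).reverse)) then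
            (acc ++ [String.ofList ((cs.drop lower).take (k - lower))], ((k + 1 : Nat) : Int))
          else (acc, (lower : Int)) := by
        rw [hf]
        simp only [if_neg hne, hcast, PySem.List.slice_natCast,
          take_drop_succ cs lower k hlk hk, simA_eq_rev]
      rw [hstep, hcast]
      set seg := (cs.drop lower).take (k - lower) with hseg
      by_cases hc : (seg == seg.reverse && !(seg ++ [cs[k]] == (seg ++ [cs[k]]).reverse)) = true
      · rw [if_pos hc, ih (cs.length - (k+1)) (by omega) (k+1) (k+1) _ rfl le_rfl]
        conv_rhs => rw [chunksB]
        rw [dif_pos hk]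
        simp only [← hseg, if_pos hc, List.append_assoc, List.singleton_append]
      · rw [if_neg hc, ih (cs.length - (k+1)) (by omega) (k+1) lower _ rfl (by omega)]
        conv_rhs => rw [chunksB]
        rw [dif_pos hk]
        simp only [← hseg, if_neg hc]
    · rw [PySem.List.pyRange_one_eq_nil (by omega), List.foldl_nil]
      rw [chunksB, dif_neg hk]
      simp

-- ===== VERDICT (by name: the statement is the Claim_ definition above) =====
theorem razdeli_spec : Claim_equal_razdeli := by
  intro niz _
  unfold Spec_razdeli razdeli razdeli_alt
  by_cases hn : niz = ""
  · subst hn; simp [chunksB]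
  · simpa [hn] using loop_eq niz.toList 0 0 le_rfl []
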